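-- pv_equiv track=rewrite | github.com/pypi-data/pypi-mirror-23 | packages/signing_clients/signing_clients-1.3.2.tar.gz/signing_clients-1.3.2/signing_clients/apps.py | ignore_certain_metainf_files
-- ===== SOURCE A (Python) =====
-- import fnmatch
--
-- def ignore_certain_metainf_files(filename):
--     """
--     We do not support multiple signatures in XPI signing because the client
--     side code makes some pretty reasonable assumptions about a single signature
--     on any given JAR.  This function returns True if the file name given is one
--     that we dispose of to prevent multiple signatures.
--     """
--     ignore = ("META-INF/manifest.mf",
--               "META-INF/*.sf",
--               "META-INF/*.rsa",
--               "META-INF/*.dsa",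
--               "META-INF/ids.json")
--
--     for glob in ignore:
--         # Explicitly match against all upper case to prevent the kind of
--         # runtime errors that lead to https://bugzil.la/1169574
--         if fnmatch.fnmatchcase(filename.upper(), glob.upper()):
--             return True
--     return False
-- ===== SOURCE B (Python) =====
-- def ignore_certain_metainf_files(filename):
--     f = filename.upper()
--     if f in ("META-INF/MANIFEST.MF", "META-INF/IDS.JSON"):
--         return True
--     return f.startswith("META-INF/") and f.endswith((".SF", ".RSA", ".DSA"))
-- ===== Notes on version B (the rewrite author's own statement) =====
-- stated objective: simpler
-- what changed: Replaces the fnmatch glob-pattern loop with two direct equality tests plus a directory-prefix check combined with a tuple endswith over the .SF/.RSA/.DSA suffixes, eliminating pattern matching entirely.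
import Mathlib
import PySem

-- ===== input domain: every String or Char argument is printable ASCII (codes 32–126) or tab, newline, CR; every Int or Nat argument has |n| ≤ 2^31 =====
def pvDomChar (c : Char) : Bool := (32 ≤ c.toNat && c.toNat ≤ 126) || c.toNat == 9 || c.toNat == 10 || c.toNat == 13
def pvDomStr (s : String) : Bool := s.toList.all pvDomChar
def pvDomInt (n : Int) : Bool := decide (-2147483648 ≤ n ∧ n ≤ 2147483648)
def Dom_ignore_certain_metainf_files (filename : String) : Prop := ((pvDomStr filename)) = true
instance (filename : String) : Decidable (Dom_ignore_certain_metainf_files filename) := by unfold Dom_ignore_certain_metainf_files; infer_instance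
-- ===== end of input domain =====

-- B replaces A's fnmatch glob loop by two equality tests and direct prefix/suffix checks (simpler).

-- ===== PORT A =====
-- fnmatch.fnmatchcase restricted to the features these fixed patterns use: literal
-- characters and '*' (matching any sequence of characters, '/' included); exact for
-- patterns without '?', '[' — all five patterns of A are of that form.
def fnmatchcase (p s : List Char) : Bool :=
  match p, s with
  | [], s => s.isEmpty
  | pc :: pr, [] => if pc = '*' then fnmatchcase pr [] else false
  | pc :: pr, c :: st =>
    if pc = '*' then fnmatchcase pr (c :: st) || fnmatchcase (pc :: pr) st
    else pc == c && fnmatchcase pr st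
  termination_by (p.length, s.length)

def ignore_certain_metainf_files (filename : String) : Bool :=
  let ignore : List String := ["META-INF/manifest.mf", "META-INF/*.sf",
    "META-INF/*.rsa", "META-INF/*.dsa", "META-INF/ids.json"]
  -- 'for glob in ignore: if fnmatchcase(upper, upper): return True / return False' = any
  ignore.any (fun glob =>
    fnmatchcase (PySem.Str.upper glob).toList (PySem.Str.upper filename).toList)

-- ===== PORT B =====
def ignore_certain_metainf_files_alt (filename : String) : Bool :=
  let f := PySem.Str.upper filename
  if f = "META-INF/MANIFEST.MF" || f = "META-INF/IDS.JSON" then true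
  else PySem.Str.startswith f "META-INF/" &&
    (PySem.Str.endswith f ".SF" || PySem.Str.endswith f ".RSA" || PySem.Str.endswith f ".DSA")

-- ===== PRECONDITION & SPEC =====
def Spec_ignore_certain_metainf_files (filename : String) (out : Bool) : Prop := out = ignore_certain_metainf_files_alt filename
instance (filename : String) (out : Bool) : Decidable (Spec_ignore_certain_metainf_files filename out) := by unfold Spec_ignore_certain_metainf_files; infer_instance

-- ===== CLAIM (what is proved, stated in full; the proofs are below) =====
def Claim_equal_ignore_certain_metainf_files : Prop := ∀ (filename : String), Dom_ignore_certain_metainf_files filename → Spec_ignore_certain_metainf_files filename (ignore_certain_metainf_files filename)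

-- ===== LEMMAS AND PROOFS =====

-- a '*'-free pattern matches exactly itself
theorem fnmatchcase_lit (q : List Char) (hq : '*' ∉ q) (s : List Char) :
    fnmatchcase q s = true ↔ s = q := by
  induction q generalizing s with
  | nil => cases s <;> simp [fnmatchcase]
  | cons c q ih =>
    have hc : c ≠ '*' := fun h => hq (h ▸ List.mem_cons_self)
    have hq' : '*' ∉ q := fun h => hq (List.mem_cons_of_mem _ h)
    cases s with
    | nil => simp [fnmatchcase, hc]
    | cons d st => simp [fnmatchcase, hc, ih hq', eq_comm (a := c)]

-- '*' followed by a '*'-free tail matches exactly the strings ending in that tail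
theorem fnmatchcase_star (q : List Char) (hq : '*' ∉ q) (s : List Char) :
    fnmatchcase ('*' :: q) s = true ↔ q <:+ s := by
  induction s with
  | nil =>
    simp [fnmatchcase, fnmatchcase_lit q hq, List.suffix_nil, eq_comm]
  | cons c st ih =>
    simp [fnmatchcase, ih, fnmatchcase_lit q hq, List.suffix_cons_iff]
    tauto

-- a '*'-free prefix of the pattern peels off literally
theorem fnmatchcase_append_lit (l : List Char) (hl : '*' ∉ l) (p s : List Char) :
    fnmatchcase (l ++ p) s = true ↔ ∃ t, s = l ++ t ∧ fnmatchcase p t = true := by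
  induction l generalizing s with
  | nil => simp
  | cons c l ih =>
    have hc : c ≠ '*' := fun h => hl (h ▸ List.mem_cons_self)
    have hl' : '*' ∉ l := fun h => hl (List.mem_cons_of_mem _ h)
    cases s with
    | nil => simp [fnmatchcase, hc]
    | cons d st =>
      rw [List.cons_append]
      simp only [fnmatchcase, if_neg hc, Bool.and_eq_true, beq_iff_eq, ih hl']
      constructor
      · rintro ⟨rfl, t, rfl, ht⟩; exact ⟨t, rfl, ht⟩
      · rintro ⟨t, hst, ht⟩
        injection hst with h5 h6
        subst h5
        exact ⟨rfl, t, h6, ht⟩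

-- two suffixes of the same list are nested by length
theorem suffix_of_suffix_length_le {α : Type} (l1 l2 s : List α)
    (h1 : l1 <:+ s) (h2 : l2 <:+ s) (h : l1.length ≤ l2.length) : l1 <:+ l2 := by
  obtain ⟨u1, rfl⟩ := h1
  obtain ⟨u2, he⟩ := h2
  have hu : u2.length ≤ u1.length := by
    have := congrArg List.length he
    simp at this; omega
  refine ⟨u1.drop u2.length, ?_⟩
  have := congrArg (List.drop u2.length) he
  rw [List.drop_append_of_le_length hu, List.drop_left] at this
  exact this.symm

-- pattern "<q>/*<suf>" matches t iff "<q>/" is a prefix of t and suf a suffix of t,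
-- provided suf contains no '/' (so the suffix cannot reach back into the prefix)
theorem star_pattern_iff (q suf : List Char) (hq : '*' ∉ q) (hsuf : '*' ∉ suf)
    (hslash : '/' ∉ suf) (t : List Char) :
    fnmatchcase ((q ++ ['/']) ++ '*' :: suf) t = true ↔
      (q ++ ['/']) <+: t ∧ suf <:+ t := by
  have hl : '*' ∉ q ++ ['/'] := by
    intro h; rcases List.mem_append.mp h with h' | h'
    · exact hq h'
    · simp at h'
  rw [fnmatchcase_append_lit _ hl]
  constructor
  · rintro ⟨r, rfl, hr⟩
    refine ⟨List.prefix_append _ _, ?_⟩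
    exact ((fnmatchcase_star suf hsuf r).mp hr).trans (List.suffix_append _ _)
  · rintro ⟨⟨r, rfl⟩, hsuff⟩
    refine ⟨r, rfl, (fnmatchcase_star suf hsuf r).mpr ?_⟩
    by_cases hlen : suf.length ≤ r.length
    · exact suffix_of_suffix_length_le suf r _ hsuff (List.suffix_append _ _) hlen
    · exfalso
      have hr : ('/' :: r) <:+ (q ++ ['/']) ++ r := ⟨q, by simp⟩
      have : ('/' :: r) <:+ suf :=
        suffix_of_suffix_length_le _ suf _ hr hsuff (by simp; omega)
      exact hslash (this.subset List.mem_cons_self)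

theorem ignore_certain_metainf_files_spec : Claim_equal_ignore_certain_metainf_files := by
  intro filename _
  unfold Spec_ignore_certain_metainf_files ignore_certain_metainf_files ignore_certain_metainf_files_alt
  rw [Bool.eq_iff_iff]
  simp only [List.any_cons, List.any_nil, Bool.or_eq_true, Bool.or_false]
  have e1 : (PySem.Str.upper "META-INF/manifest.mf").toList = "META-INF/MANIFEST.MF".toList := by decide
  have e2 : (PySem.Str.upper "META-INF/*.sf").toList = ("META-INF".toList ++ ['/']) ++ '*' :: ".SF".toList := by decide
  have e3 : (PySem.Str.upper "META-INF/*.rsa").toList = ("META-INF".toList ++ ['/']) ++ '*' :: ".RSA".toList := by decide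
  have e4 : (PySem.Str.upper "META-INF/*.dsa").toList = ("META-INF".toList ++ ['/']) ++ '*' :: ".DSA".toList := by decide
  have e5 : (PySem.Str.upper "META-INF/ids.json").toList = "META-INF/IDS.JSON".toList := by decide
  rw [e1, e2, e3, e4, e5]
  set f := PySem.Str.upper filename with hf
  set t := f.toList with ht
  rw [fnmatchcase_lit "META-INF/MANIFEST.MF".toList (by decide) t,
    fnmatchcase_lit "META-INF/IDS.JSON".toList (by decide) t,
    star_pattern_iff "META-INF".toList ".SF".toList (by decide) (by decide) (by decide) t,
    star_pattern_iff "META-INF".toList ".RSA".toList (by decide) (by decide) (by decide) t,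
    star_pattern_iff "META-INF".toList ".DSA".toList (by decide) (by decide) (by decide) t]
  have hpre : "META-INF/".toList = "META-INF".toList ++ ['/'] := by decide
  have hM1 : (f = "META-INF/MANIFEST.MF") ↔ t = "META-INF/MANIFEST.MF".toList := by
    rw [ht]; exact String.toList_inj.symm
  have hM2 : (f = "META-INF/IDS.JSON") ↔ t = "META-INF/IDS.JSON".toList := by
    rw [ht]; exact String.toList_inj.symm
  split_ifs with hcond
  · simp only [decide_eq_true_eq] at hcond
    simp only [iff_true]
    rcases hcond with h | h
    · exact Or.inl (hM1.mp h)
    · refine Or.inr (Or.inr (Or.inr (Or.inr ?_))); exact hM2.mp h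
  · simp only [decide_eq_true_eq, not_or] at hcond
    simp only [PySem.Str.startswith_eq, PySem.Str.endswith_eq, Bool.and_eq_true,
      Bool.or_eq_true, PySem.Chars.startswith_iff, PySem.Chars.endswith_iff, ← ht, hpre]
    rw [hM1, hM2] at hcond
    constructor
    · rintro (h | ⟨hp, hs⟩ | ⟨hp, hs⟩ | ⟨hp, hs⟩ | h)
      · exact absurd h hcond.1
      · exact ⟨hp, Or.inl (Or.inl hs)⟩
      · exact ⟨hp, Or.inl (Or.inr hs)⟩
      · exact ⟨hp, Or.inr hs⟩
      · exact absurd h hcond.2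
    · rintro ⟨hp, (hs | hs) | hs⟩
      · exact Or.inr (Or.inl ⟨hp, hs⟩)
      · exact Or.inr (Or.inr (Or.inl ⟨hp, hs⟩))
      · exact Or.inr (Or.inr (Or.inr (Or.inl ⟨hp, hs⟩)))
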